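-- pv_equiv track=rewrite | github.com/wellsniko/leetcode | leetcode.py | multiply_num_strings
-- ===== SOURCE A (Python) =====
-- def multiply_num_strings(num1: str, num2: str) -> str:
--     h = {'0': 0, '1': 1, '2': 2, '3': 3, '4': 4,'5': 5, '6': 6, '7': 7, '8': 8, '9': 9}
--
--     res1 = 0
--     for char in num1:
--         res1 = 10*res1 + h[char]
--
--     res2 = 0
--     for char in num2:
--         res2 = 10*res2 + h[char]
--
--     return str(res1 * res2)
-- ===== SOURCE B (Python) =====
-- def _scale(a, y):
--     # multiply a little-endian digit list by a single digit
--     out = []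
--     carry = 0
--     for x in a:
--         v = x * y + carry
--         out.append(v % 10)
--         carry = v // 10
--     if carry:
--         out.append(carry)
--     return out
--
--
-- def _add(xs, ys):
--     # add two little-endian digit lists
--     out = []
--     carry = 0
--     i = 0
--     while i < len(xs) or i < len(ys):
--         v = carry
--         if i < len(xs):
--             v += xs[i]
--         if i < len(ys):
--             v += ys[i]
--         out.append(v % 10)
--         carry = v // 10
--         i += 1
--     if carry:
--         out.append(carry)
--     return out
--
--
-- def _strip(ds):
--     # drop leading zeros of a big-endian digit list
--     i = 0
--     while i < len(ds) and ds[i] == 0: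
--         i += 1
--     return ds[i:]
--
--
-- def multiply_num_strings(num1: str, num2: str) -> str:
--     a = [ord(c) - 48 for c in reversed(num1)]  # little-endian digit values
--     b = [ord(c) - 48 for c in reversed(num2)]
--     prod = []
--     for sh, y in enumerate(b):
--         prod = _add(prod, [0] * sh + _scale(a, y))
--     digits = _strip(prod[::-1])
--     if not digits:
--         return '0'
--     return ''.join(str(d) for d in digits)
-- ===== Notes on version B (the rewrite author's own statement) =====
-- stated objective: alternative
-- what changed: Replaces A's parse-both-strings-to-big-integers, multiply and str() with grade-school multiplication on little-endian digit lists (per-digit scale and shifted add with carries, then strip leading zeros and join), never forming a big integer.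
import Mathlib
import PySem

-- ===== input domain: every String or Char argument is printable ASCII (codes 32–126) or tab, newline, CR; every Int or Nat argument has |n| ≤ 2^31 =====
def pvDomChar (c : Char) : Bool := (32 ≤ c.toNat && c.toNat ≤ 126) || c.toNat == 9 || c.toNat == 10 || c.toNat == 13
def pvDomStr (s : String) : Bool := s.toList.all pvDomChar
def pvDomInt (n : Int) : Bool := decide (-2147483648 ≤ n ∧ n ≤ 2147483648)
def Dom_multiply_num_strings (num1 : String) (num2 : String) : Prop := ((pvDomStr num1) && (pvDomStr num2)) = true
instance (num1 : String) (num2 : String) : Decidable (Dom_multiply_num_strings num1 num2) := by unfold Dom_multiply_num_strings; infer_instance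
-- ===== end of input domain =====

-- B replaces A's parse-to-big-integer, multiply and str() with grade-school digit-list
-- multiplication (alternative algorithm, similar cost); equal on all digit-string inputs.


-- ===== PORT A =====
-- A's literal digit dict; h[char] raises KeyError off the digit chars, so Pre_ restricts
-- to digit strings and the total lookup getD … 0 is exact there.
def pvDigitDict : PySem.Dict Char Int :=
  PySem.Dict.ofList [('0', 0), ('1', 1), ('2', 2), ('3', 3), ('4', 4),
                     ('5', 5), ('6', 6), ('7', 7), ('8', 8), ('9', 9)]

def multiply_num_strings (num1 : String) (num2 : String) : String :=
  let res1 := num1.toList.foldl (fun r c => 10 * r + pvDigitDict.getD c 0) 0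
  let res2 := num2.toList.foldl (fun r c => 10 * r + pvDigitDict.getD c 0) 0
  PySem.Int.toStr (res1 * res2)

-- ===== PORT B =====
-- [ord(c) - 48 for c in reversed(s)]
def pvDigitsLE (s : String) : List Int := s.toList.reverse.map (fun c => (c.toNat : Int) - 48)

-- _scale: little-endian digit list times one digit, with carry
def pvScale (y : Int) : Int → List Int → List Int
  | c, [] => if c ≠ 0 then [c] else []
  | c, x :: xs => PySem.Int.mod (x * y + c) 10 :: pvScale y (PySem.Int.floordiv (x * y + c) 10) xs

-- _add: sum of two little-endian digit lists, with carry
def pvAdd : Int → List Int → List Int → List Int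
  | c, [], [] => if c ≠ 0 then [c] else []
  | c, [], y :: ys => PySem.Int.mod (y + c) 10 :: pvAdd (PySem.Int.floordiv (y + c) 10) [] ys
  | c, x :: xs, [] => PySem.Int.mod (x + c) 10 :: pvAdd (PySem.Int.floordiv (x + c) 10) xs []
  | c, x :: xs, y :: ys =>
      PySem.Int.mod (x + y + c) 10 :: pvAdd (PySem.Int.floordiv (x + y + c) 10) xs ys

-- the 'for sh, y in enumerate(b)' accumulation loop
def pvMulGo (a : List Int) : Nat → List Int → List Int → List Int
  | _, acc, [] => acc
  | sh, acc, y :: ys => pvMulGo a (sh + 1) (pvAdd 0 acc (List.replicate sh 0 ++ pvScale y 0 a)) ys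

-- _strip: drop leading zeros of a big-endian digit list
def pvStrip : List Int → List Int
  | [] => []
  | d :: ds => if d = 0 then pvStrip ds else d :: ds

def multiply_num_strings_alt (num1 : String) (num2 : String) : String :=
  let a := pvDigitsLE num1
  let b := pvDigitsLE num2
  let digits := pvStrip (pvMulGo a 0 [] b).reverse
  if digits = [] then "0"
  else String.ofList ((digits.map PySem.Int.toChars).flatten)

-- ===== PRECONDITION & SPEC =====
-- Pre_ excludes exactly the inputs containing a non-digit character, on which A raises KeyError.
def Pre_multiply_num_strings (num1 : String) (num2 : String) : Prop :=
  num1.toList.all (fun c => decide ('0' ≤ c) && decide (c ≤ '9')) = true ∧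
  num2.toList.all (fun c => decide ('0' ≤ c) && decide (c ≤ '9')) = true

instance (num1 : String) (num2 : String) : Decidable (Pre_multiply_num_strings num1 num2) := by
  unfold Pre_multiply_num_strings; infer_instance

def pvWitness_multiply_num_strings : String × String := ("12", "345")

def Spec_multiply_num_strings (num1 : String) (num2 : String) (out : String) : Prop :=
  out = multiply_num_strings_alt num1 num2

instance (num1 : String) (num2 : String) (out : String) :
    Decidable (Spec_multiply_num_strings num1 num2 out) := by
  unfold Spec_multiply_num_strings; infer_instance

-- ===== CLAIM (what is proved, stated in full; the proofs are below) =====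
def Claim_equal_multiply_num_strings : Prop :=
  ∀ (num1 : String) (num2 : String), Dom_multiply_num_strings num1 num2 →
    Pre_multiply_num_strings num1 num2 →
    Spec_multiply_num_strings num1 num2 (multiply_num_strings num1 num2)

-- ===== LEMMAS AND PROOFS =====

-- little-endian and big-endian (Horner) values of a digit list
def pvValLE : List Int → Int
  | [] => 0
  | d :: ds => d + 10 * pvValLE ds

def pvValBE (ds : List Int) : Int := ds.foldl (fun a d => 10 * a + d) 0

def pvBounded (ds : List Int) : Prop := ∀ d ∈ ds, 0 ≤ d ∧ d < 10

-- decimal digit characters of a Nat (spec-side reformulation of Nat.toDigits)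
def pvMyDigs (n : Nat) : List Char :=
  if n < 10 then [Nat.digitChar n] else pvMyDigs (n / 10) ++ [Nat.digitChar (n % 10)]
  decreasing_by exact Nat.div_lt_self (by omega) (by omega)

theorem pv_digitDict_getD (c : Char) (h0 : '0' ≤ c) (h9 : c ≤ '9') :
    pvDigitDict.getD c 0 = (c.toNat : Int) - 48 := by
  simp [Char.le_def, UInt32.le_iff_toNat_le] at h0 h9
  rw [← Char.ofNat_toNat c]
  interval_cases h : c.toNat <;> decide

theorem pv_digit_bounds (c : Char) (h0 : '0' ≤ c) (h9 : c ≤ '9') :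
    0 ≤ (c.toNat : Int) - 48 ∧ (c.toNat : Int) - 48 < 10 := by
  simp [Char.le_def, UInt32.le_iff_toNat_le] at h0 h9
  omega

theorem pv_valLE_eq_valBE_reverse (ds : List Int) : pvValLE ds = pvValBE ds.reverse := by
  induction ds with
  | nil => rfl
  | cons d ds ih => simp [pvValLE, pvValBE, List.foldl_append, ih]; ring

theorem pv_scale_val (y : Int) (xs : List Int) (c : Int) :
    pvValLE (pvScale y c xs) = pvValLE xs * y + c := by
  induction xs generalizing c with
  | nil => by_cases h : c = 0 <;> simp [pvScale, pvValLE, h]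
  | cons x xs ih =>
    simp only [pvScale, pvValLE, ih,
      PySem.Int.mod_eq_emod_of_pos (by norm_num : (0:Int) < 10),
      PySem.Int.floordiv_eq_ediv_of_pos (by norm_num : (0:Int) < 10)]
    have h := Int.emod_add_mul_ediv (x * y + c) 10
    ring_nf
    ring_nf at h
    linarith

theorem pv_add_val (xs ys : List Int) (c : Int) :
    pvValLE (pvAdd c xs ys) = pvValLE xs + pvValLE ys + c := by
  induction xs generalizing ys c with
  | nil =>
    induction ys generalizing c with
    | nil => by_cases h : c = 0 <;> simp [pvAdd, pvValLE, h]
    | cons y ys ih =>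
      simp only [pvAdd, pvValLE, ih,
        PySem.Int.mod_eq_emod_of_pos (by norm_num : (0:Int) < 10),
        PySem.Int.floordiv_eq_ediv_of_pos (by norm_num : (0:Int) < 10)]
      have h := Int.emod_add_mul_ediv (y + c) 10
      ring_nf; ring_nf at h; linarith
  | cons x xs ih =>
    cases ys with
    | nil =>
      simp only [pvAdd, pvValLE, ih,
        PySem.Int.mod_eq_emod_of_pos (by norm_num : (0:Int) < 10),
        PySem.Int.floordiv_eq_ediv_of_pos (by norm_num : (0:Int) < 10)]
      have h := Int.emod_add_mul_ediv (x + c) 10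
      ring_nf; ring_nf at h; linarith
    | cons y ys =>
      simp only [pvAdd, pvValLE, ih,
        PySem.Int.mod_eq_emod_of_pos (by norm_num : (0:Int) < 10),
        PySem.Int.floordiv_eq_ediv_of_pos (by norm_num : (0:Int) < 10)]
      have h := Int.emod_add_mul_ediv (x + y + c) 10
      ring_nf; ring_nf at h; linarith

theorem pv_replicate_val (n : Nat) (zs : List Int) :
    pvValLE (List.replicate n 0 ++ zs) = 10 ^ n * pvValLE zs := by
  induction n with
  | zero => simp
  | succ n ih => simp [List.replicate_succ, pvValLE, ih]; ring

theorem pv_mulGo_val (a : List Int) (ys : List Int) (sh : Nat) (acc : List Int) :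
    pvValLE (pvMulGo a sh acc ys) = pvValLE acc + 10 ^ sh * (pvValLE a * pvValLE ys) := by
  induction ys generalizing sh acc with
  | nil => simp [pvMulGo, pvValLE]
  | cons y ys ih =>
    simp only [pvMulGo, ih, pv_add_val, pv_replicate_val, pv_scale_val, pvValLE]
    ring

theorem pv_scale_bounded (y : Int) (hy0 : 0 ≤ y) (hy9 : y < 10) (xs : List Int)
    (hxs : pvBounded xs) (c : Int) (hc0 : 0 ≤ c) (hc9 : c < 10) :
    pvBounded (pvScale y c xs) := by
  induction xs generalizing c with
  | nil =>
    intro d hd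
    by_cases h : c = 0 <;> simp [pvScale, h] at hd
    exact hd ▸ ⟨hc0, hc9⟩
  | cons x xs ih =>
    have hx := hxs x (by simp)
    have hv0 : 0 ≤ x * y + c := by have := mul_nonneg hx.1 hy0; linarith
    have hv9 : x * y + c ≤ 90 := by nlinarith [hx.1, hx.2]
    intro d hd
    rw [pvScale, PySem.Int.mod_eq_emod_of_pos (by norm_num : (0:Int) < 10),
      PySem.Int.floordiv_eq_ediv_of_pos (by norm_num : (0:Int) < 10)] at hd
    rcases List.mem_cons.mp hd with h | h
    · subst h; omega
    · exact ih (fun e he => hxs e (by simp [he])) _ (by omega) (by omega) d h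

theorem pv_add_bounded (xs : List Int) : ∀ (ys : List Int), pvBounded xs → pvBounded ys →
    ∀ (c : Int), 0 ≤ c → c ≤ 1 → pvBounded (pvAdd c xs ys) := by
  induction xs with
  | nil =>
    intro ys
    induction ys with
    | nil =>
      intro _ _ c hc0 hc1 d hd
      by_cases h : c = 0 <;> simp [pvAdd, h] at hd
      exact hd ▸ ⟨hc0, by omega⟩
    | cons y ys ih =>
      intro hxs hys c hc0 hc1 d hd
      have hy := hys y (by simp)
      rw [pvAdd, PySem.Int.mod_eq_emod_of_pos (by norm_num : (0:Int) < 10),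
        PySem.Int.floordiv_eq_ediv_of_pos (by norm_num : (0:Int) < 10)] at hd
      rcases List.mem_cons.mp hd with h | h
      · subst h; omega
      · exact ih hxs (fun e he => hys e (by simp [he])) _ (by omega) (by omega) d h
  | cons x xs ih =>
    intro ys hxs hys c hc0 hc1 d hd
    have hx := hxs x (by simp)
    cases ys with
    | nil =>
      rw [pvAdd, PySem.Int.mod_eq_emod_of_pos (by norm_num : (0:Int) < 10),
        PySem.Int.floordiv_eq_ediv_of_pos (by norm_num : (0:Int) < 10)] at hd
      rcases List.mem_cons.mp hd with h | h
      · subst h; omega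
      · exact ih [] (fun e he => hxs e (by simp [he])) hys _ (by omega) (by omega) d h
    | cons y ys =>
      have hy := hys y (by simp)
      rw [pvAdd, PySem.Int.mod_eq_emod_of_pos (by norm_num : (0:Int) < 10),
        PySem.Int.floordiv_eq_ediv_of_pos (by norm_num : (0:Int) < 10)] at hd
      rcases List.mem_cons.mp hd with h | h
      · subst h; omega
      · exact ih ys (fun e he => hxs e (by simp [he])) (fun e he => hys e (by simp [he]))
          _ (by omega) (by omega) d h

theorem pv_mulGo_bounded (a : List Int) (ha : pvBounded a) (ys : List Int) (hys : pvBounded ys)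
    (sh : Nat) (acc : List Int) (hacc : pvBounded acc) : pvBounded (pvMulGo a sh acc ys) := by
  induction ys generalizing sh acc with
  | nil => simpa [pvMulGo] using hacc
  | cons y ys ih =>
    have hy := hys y (by simp)
    rw [pvMulGo]
    apply ih (fun e he => hys e (by simp [he]))
    apply pv_add_bounded _ _ hacc _ 0 le_rfl (by norm_num)
    intro d hd
    rcases List.mem_append.mp hd with h | h
    · have := List.eq_of_mem_replicate h; subst this; norm_num
    · exact pv_scale_bounded y hy.1 hy.2 a ha 0 le_rfl (by norm_num) d h

theorem pv_strip_bounded (ds : List Int) (h : pvBounded ds) : pvBounded (pvStrip ds) := by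
  induction ds with
  | nil => simpa [pvStrip]
  | cons d ds ih =>
    rw [pvStrip]
    split
    · exact ih (fun e he => h e (by simp [he]))
    · exact h

theorem pv_strip_head (ds : List Int) (d : Int) (rest : List Int)
    (h : pvStrip ds = d :: rest) : d ≠ 0 := by
  induction ds with
  | nil => simp [pvStrip] at h
  | cons e ds ih =>
    rw [pvStrip] at h
    split at h
    · exact ih h
    · rename_i hne; injection h with h1 h2; rw [← h1]; exact hne

theorem pv_strip_idem (ds : List Int) : pvStrip (pvStrip ds) = pvStrip ds := by
  induction ds with
  | nil => rfl
  | cons d ds ih =>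
    rw [pvStrip]
    split
    · exact ih
    · rw [pvStrip]; simp_all

theorem pv_strip_val (ds : List Int) : pvValBE (pvStrip ds) = pvValBE ds := by
  induction ds with
  | nil => rfl
  | cons d ds ih =>
    by_cases h : d = 0
    · simp [pvStrip, h, pvValBE] at *; exact ih
    · simp [pvStrip, h]

theorem pv_valBE_nonneg (ds : List Int) (h : ∀ d ∈ ds, 0 ≤ d) : 0 ≤ pvValBE ds := by
  suffices H : ∀ (ds : List Int) (acc : Int), 0 ≤ acc → (∀ d ∈ ds, 0 ≤ d) →
      0 ≤ ds.foldl (fun a d => 10 * a + d) acc by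
    exact H ds 0 le_rfl h
  intro ds
  induction ds with
  | nil => intro acc h _; exact h
  | cons d ds ih =>
    intro acc hacc hd
    simp only [List.foldl_cons]
    exact ih _ (by have := hd d (by simp); omega) (fun e he => hd e (by simp [he]))

theorem pv_toDigitsCore_eq (f : Nat) : ∀ (n : Nat) (ds : List Char), n < f →
    Nat.toDigitsCore 10 f n ds = pvMyDigs n ++ ds := by
  induction f with
  | zero => omega
  | succ f ih =>
    intro n ds hn
    rw [Nat.toDigitsCore]
    by_cases h : n / 10 = 0
    · simp only [h, if_true]
      rw [pvMyDigs]
      have hlt : n < 10 := by omega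
      rw [if_pos hlt, Nat.mod_eq_of_lt hlt]
      simp
    · simp only [h, if_false]
      rw [ih (n / 10) _ (by omega)]
      conv_rhs => rw [pvMyDigs]
      have hlt : ¬ n < 10 := by omega
      rw [if_neg hlt]
      simp

theorem pv_toDigits_eq (n : Nat) : Nat.toDigits 10 n = pvMyDigs n := by
  rw [Nat.toDigits, pv_toDigitsCore_eq (n + 1) n [] (by omega), List.append_nil]

theorem pv_myDigs_step (V D : Nat) (hV : 0 < V) (hD : D < 10) :
    pvMyDigs (10 * V + D) = pvMyDigs V ++ [Nat.digitChar D] := by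
  rw [pvMyDigs]
  have h1 : ¬ 10 * V + D < 10 := by omega
  have h2 : (10 * V + D) / 10 = V := by omega
  have h3 : (10 * V + D) % 10 = D := by omega
  simp [h1, h2, h3]

theorem pv_flatten_singletons {α β : Type} (g : α → β) (xs : List α) :
    (xs.map (fun x => [g x])).flatten = xs.map g := by
  induction xs with
  | nil => rfl
  | cons x xs ih => simp [ih]

theorem pv_myDigs_foldl (ds : List Int) (hds : pvBounded ds) : ∀ (V : Nat), 0 < V →
    pvMyDigs (ds.foldl (fun a d => 10 * a + d) (V : Int)).toNat
      = pvMyDigs V ++ ds.map (fun d => Nat.digitChar d.toNat) := by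
  induction ds with
  | nil => intro V hV; simp
  | cons d ds ih =>
    intro V hV
    have hd := hds d (by simp)
    have hcast : 10 * (V : Int) + d = ((10 * V + d.toNat : Nat) : Int) := by
      push_cast [Int.toNat_of_nonneg hd.1]; ring
    simp only [List.foldl_cons, hcast]
    rw [ih (fun e he => hds e (by simp [he])) (10 * V + d.toNat) (by omega)]
    rw [pv_myDigs_step V d.toNat hV (by omega)]
    simp [List.append_assoc]

theorem pv_toChars_digit (d : Int) (h0 : 0 ≤ d) (h9 : d < 10) :
    PySem.Int.toChars d = [Nat.digitChar d.toNat] := by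
  rw [PySem.Int.toChars, if_neg (by omega), pv_toDigits_eq, pvMyDigs, if_pos (by omega)]

-- main characterisation: toChars of the value of a stripped bounded big-endian list
theorem pv_toChars_valBE (ds : List Int) (hds : pvBounded ds) (hstrip : pvStrip ds = ds) :
    PySem.Int.toChars (pvValBE ds)
      = if ds = [] then ['0'] else (ds.map PySem.Int.toChars).flatten := by
  cases ds with
  | nil => rfl
  | cons d rest =>
    have hd0 : d ≠ 0 := pv_strip_head (d :: rest) d rest hstrip
    have hd := hds d (by simp)
    have hrest : pvBounded rest := fun e he => hds e (by simp [he])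
    rw [PySem.Int.toChars, if_neg (by
      have := pv_valBE_nonneg (d :: rest) (fun e he => (hds e he).1); omega),
      if_neg (by simp)]
    have hval : pvValBE (d :: rest)
        = rest.foldl (fun a e => 10 * a + e) ((d.toNat : Nat) : Int) := by
      simp [pvValBE, Int.toNat_of_nonneg hd.1]
    rw [pv_toDigits_eq, hval, pv_myDigs_foldl rest hrest d.toNat (by omega)]
    rw [pvMyDigs, if_pos (by omega)]
    rw [List.map_cons, List.flatten_cons, pv_toChars_digit d hd.1 hd.2]
    congr 1
    rw [List.map_congr_left (fun e he => pv_toChars_digit e (hrest e he).1 (hrest e he).2)]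
    exact (pv_flatten_singletons (fun e => e.toNat.digitChar) rest).symm

-- A's Horner loop computes the big-endian value of the digit values
theorem pv_horner_eq (cs : List Char) (h : ∀ c ∈ cs, '0' ≤ c ∧ c ≤ '9') :
    cs.foldl (fun r c => 10 * r + pvDigitDict.getD c 0) 0
      = pvValBE (cs.map (fun c => (c.toNat : Int) - 48)) := by
  suffices H : ∀ (cs : List Char) (acc : Int), (∀ c ∈ cs, '0' ≤ c ∧ c ≤ '9') →
      cs.foldl (fun r c => 10 * r + pvDigitDict.getD c 0) acc
        = (cs.map (fun c => (c.toNat : Int) - 48)).foldl (fun a d => 10 * a + d) acc by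
    exact H cs 0 h
  intro cs
  induction cs with
  | nil => intro acc _; rfl
  | cons c cs ih =>
    intro acc hc
    have h1 := hc c (by simp)
    simp only [List.foldl_cons, List.map_cons, pv_digitDict_getD c h1.1 h1.2]
    exact ih _ (fun e he => hc e (by simp [he]))

-- ===== VERDICT (by name: the statement is the Claim_ definition above) =====
theorem multiply_num_strings_spec : Claim_equal_multiply_num_strings := by
  intro num1 num2 _ hpre
  have h1 : ∀ c ∈ num1.toList, '0' ≤ c ∧ c ≤ '9' := by simpa using hpre.1
  have h2 : ∀ c ∈ num2.toList, '0' ≤ c ∧ c ≤ '9' := by simpa using hpre.2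
  unfold Spec_multiply_num_strings multiply_num_strings multiply_num_strings_alt
  simp only []
  -- digit-value lists, big-endian
  have hb1 : ∀ d ∈ (num1.toList.map (fun c => (c.toNat : Int) - 48)), 0 ≤ d ∧ d < 10 := by
    intro d hd
    obtain ⟨c, hc, rfl⟩ := List.mem_map.mp hd
    exact pv_digit_bounds c (h1 c hc).1 (h1 c hc).2
  have hb2 : ∀ d ∈ (num2.toList.map (fun c => (c.toNat : Int) - 48)), 0 ≤ d ∧ d < 10 := by
    intro d hd
    obtain ⟨c, hc, rfl⟩ := List.mem_map.mp hd
    exact pv_digit_bounds c (h2 c hc).1 (h2 c hc).2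
  -- B's little-endian digit lists are the reverses of those
  have ha1 : pvDigitsLE num1 = (num1.toList.map (fun c => (c.toNat : Int) - 48)).reverse := by
    simp [pvDigitsLE]
  have ha2 : pvDigitsLE num2 = (num2.toList.map (fun c => (c.toNat : Int) - 48)).reverse := by
    simp [pvDigitsLE]
  -- value of the product digit list
  set A1 := num1.toList.map (fun c => (c.toNat : Int) - 48) with hA1
  set A2 := num2.toList.map (fun c => (c.toNat : Int) - 48) with hA2
  set prod := pvMulGo (pvDigitsLE num1) 0 [] (pvDigitsLE num2) with hprod
  have hval : pvValBE (pvStrip prod.reverse)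
      = num1.toList.foldl (fun r c => 10 * r + pvDigitDict.getD c 0) 0
        * num2.toList.foldl (fun r c => 10 * r + pvDigitDict.getD c 0) 0 := by
    rw [pv_strip_val, ← pv_valLE_eq_valBE_reverse, hprod, pv_mulGo_val,
      pv_horner_eq _ h1, pv_horner_eq _ h2, ha1, ha2,
      pv_valLE_eq_valBE_reverse A1.reverse, pv_valLE_eq_valBE_reverse A2.reverse,
      List.reverse_reverse A1, List.reverse_reverse A2]
    simp only [pvValLE, pvValBE, pow_zero, one_mul, zero_add, hA1, hA2]
  -- boundedness of the stripped digit list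
  have hbounded : pvBounded (pvStrip prod.reverse) := by
    apply pv_strip_bounded
    intro d hd
    refine pv_mulGo_bounded (pvDigitsLE num1) ?_ (pvDigitsLE num2) ?_ 0 [] (by intro e he; simp at he) d (List.mem_reverse.mp hd)
    · rw [ha1]; intro e he; exact hb1 e (List.mem_reverse.mp he)
    · rw [ha2]; intro e he; exact hb2 e (List.mem_reverse.mp he)
  -- assemble
  rw [PySem.Int.toStr, ← hval,
    pv_toChars_valBE _ hbounded (pv_strip_idem prod.reverse)]
  split
  · decide
  · rfl
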